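-- pv_equiv track=rewrite | github.com/chloesgit/nutriscore | Part_5/MajoritySorting.py | PessimisticmajoritySortingElement
-- ===== SOURCE A (Python) =====
-- def load_profiles(limiting_profiles):
--     profiles = []
--     for i in range(len(limiting_profiles[0])):
--         profile = []
--         for j in range(len(limiting_profiles)):
--             profile.append(limiting_profiles[j][i])
--         profiles.append(profile)
--     return profiles
--
-- def compute_score(a,weights,profile):
--     res = 0
--     for i,w in enumerate(a):
--         if w > profile[i]:
--             res += weights[i]
--     return res
--
-- def PessimisticmajoritySortingElement(a,weights,limiting_profiles,threshold):
--     profiles = load_profiles(limiting_profiles)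
--     scores = []
--     category = -1
--     for profile in profiles:
--         score = compute_score(a,weights,profile)
--         scores.append(score)
--         if score >= threshold:
--             category +=1
--     return category
-- ===== SOURCE B (Python) =====
-- def PessimisticmajoritySortingElement(a, weights, limiting_profiles, threshold):
--     num = len(limiting_profiles[0])
--     scores = [0] * num
--     for i, val in enumerate(a):
--         scores = [s + (weights[i] if val > limiting_profiles[i][c] else 0)
--                   for c, s in enumerate(scores)]
--     return sum(1 for s in scores if s >= threshold) - 1
-- ===== Notes on version B (the rewrite author's own statement) =====
-- stated objective: alternative
-- what changed: Drops the explicit transpose (load_profiles) and the per-profile rescans: one row-major pass over a updates all column scores at once, then counts scores meeting the threshold arithmetically instead of with a running category counter.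
import Mathlib
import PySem

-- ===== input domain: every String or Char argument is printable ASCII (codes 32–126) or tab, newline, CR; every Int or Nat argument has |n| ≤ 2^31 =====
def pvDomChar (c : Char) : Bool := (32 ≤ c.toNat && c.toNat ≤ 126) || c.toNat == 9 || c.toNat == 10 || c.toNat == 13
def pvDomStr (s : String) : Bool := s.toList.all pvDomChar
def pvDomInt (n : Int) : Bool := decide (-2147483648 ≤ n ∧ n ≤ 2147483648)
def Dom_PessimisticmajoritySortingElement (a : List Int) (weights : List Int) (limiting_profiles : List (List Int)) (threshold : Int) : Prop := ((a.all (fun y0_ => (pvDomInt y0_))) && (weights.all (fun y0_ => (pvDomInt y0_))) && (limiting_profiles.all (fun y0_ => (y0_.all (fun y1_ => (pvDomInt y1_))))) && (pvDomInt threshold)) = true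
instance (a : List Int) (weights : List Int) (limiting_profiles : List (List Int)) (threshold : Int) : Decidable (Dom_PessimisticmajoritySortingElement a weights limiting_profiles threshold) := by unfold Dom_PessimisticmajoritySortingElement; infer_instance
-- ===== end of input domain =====

-- B replaces A's explicit transpose + per-profile rescans with a single row-major pass
-- that updates all column scores at once, then counts threshold hits (objective: alternative).

-- ===== PORT A =====
def pvLoadProfiles (lp : List (List Int)) : List (List Int) :=
  (List.range (lp.headD []).length).map (fun (i : Nat) =>
    (List.range lp.length).map (fun (j : Nat) =>
      (PySem.List.pyGet? ((PySem.List.pyGet? lp (j : Int)).getD []) (i : Int)).getD 0))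

def pvComputeScore (a : List Int) (weights : List Int) (profile : List Int) : Int :=
  (PySem.List.enumerate a 0).foldl (fun res iw =>
    if iw.2 > (PySem.List.pyGet? profile iw.1).getD 0
    then res + (PySem.List.pyGet? weights iw.1).getD 0 else res) 0

def PessimisticmajoritySortingElement (a : List Int) (weights : List Int) (limiting_profiles : List (List Int)) (threshold : Int) : Int :=
  let profiles := pvLoadProfiles limiting_profiles
  (profiles.foldl (fun (st : List Int × Int) profile =>
      let score := pvComputeScore a weights profile
      (st.1 ++ [score], if score ≥ threshold then st.2 + 1 else st.2))
    (([] : List Int), (-1 : Int))).2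

-- ===== PORT B =====
def PessimisticmajoritySortingElement_alt (a : List Int) (weights : List Int) (limiting_profiles : List (List Int)) (threshold : Int) : Int :=
  let num := (limiting_profiles.headD []).length
  let scores := (PySem.List.enumerate a 0).foldl
    (fun scores iv =>
      (PySem.List.enumerate scores 0).map (fun cs =>
        cs.2 + (if iv.2 > (PySem.List.pyGet? ((PySem.List.pyGet? limiting_profiles iv.1).getD []) cs.1).getD 0
                then (PySem.List.pyGet? weights iv.1).getD 0 else 0)))
    (List.replicate num (0 : Int))
  (scores.foldl (fun acc s => if s ≥ threshold then acc + 1 else acc) 0) - 1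

-- ===== PRECONDITION & SPEC =====
-- Pre_ = exactly the inputs on which Python A returns: the matrix is nonempty, every row is at
-- least as long as row 0, and (when there is at least one column) a fits in the matrix height and
-- weights[i] is in range whenever the comparison branch can fire at index i.
def Pre_PessimisticmajoritySortingElement (a : List Int) (weights : List Int) (limiting_profiles : List (List Int)) (threshold : Int) : Prop :=
  limiting_profiles ≠ [] ∧
  (∀ row ∈ limiting_profiles, (limiting_profiles.headD []).length ≤ row.length) ∧
  ((limiting_profiles.headD []).length = 0 ∨
    (a.length ≤ limiting_profiles.length ∧
     ∀ i < a.length, weights.length ≤ i →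
       ∀ c < (limiting_profiles.headD []).length,
         a.getD i 0 ≤ (limiting_profiles.getD i []).getD c 0))
instance (a : List Int) (weights : List Int) (limiting_profiles : List (List Int)) (threshold : Int) : Decidable (Pre_PessimisticmajoritySortingElement a weights limiting_profiles threshold) := by unfold Pre_PessimisticmajoritySortingElement; infer_instance

def pvWitness_PessimisticmajoritySortingElement : List Int × List Int × List (List Int) × Int :=
  ([1, 0], [2, 3], [[0, 5], [1, 1]], 2)

def Spec_PessimisticmajoritySortingElement (a : List Int) (weights : List Int) (limiting_profiles : List (List Int)) (threshold : Int) (out : Int) : Prop := out = PessimisticmajoritySortingElement_alt a weights limiting_profiles threshold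
instance (a : List Int) (weights : List Int) (limiting_profiles : List (List Int)) (threshold : Int) (out : Int) : Decidable (Spec_PessimisticmajoritySortingElement a weights limiting_profiles threshold out) := by unfold Spec_PessimisticmajoritySortingElement; infer_instance

-- ===== CLAIM (what is proved, stated in full; the proofs are below) =====
def Claim_equal_PessimisticmajoritySortingElement : Prop := ∀ (a : List Int) (weights : List Int) (limiting_profiles : List (List Int)) (threshold : Int), Dom_PessimisticmajoritySortingElement a weights limiting_profiles threshold → Pre_PessimisticmajoritySortingElement a weights limiting_profiles threshold → Spec_PessimisticmajoritySortingElement a weights limiting_profiles threshold (PessimisticmajoritySortingElement a weights limiting_profiles threshold)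

-- ===== LEMMAS AND PROOFS =====

-- the matrix entry lp[i][c] as both ports read it
def pvG (lp : List (List Int)) (i c : Int) : Int :=
  (PySem.List.pyGet? ((PySem.List.pyGet? lp i).getD []) c).getD 0

theorem pvWitness_ok :
    Dom_PessimisticmajoritySortingElement (pvWitness_PessimisticmajoritySortingElement.1) (pvWitness_PessimisticmajoritySortingElement.2.1) (pvWitness_PessimisticmajoritySortingElement.2.2.1) (pvWitness_PessimisticmajoritySortingElement.2.2.2) ∧
    Pre_PessimisticmajoritySortingElement (pvWitness_PessimisticmajoritySortingElement.1) (pvWitness_PessimisticmajoritySortingElement.2.1) (pvWitness_PessimisticmajoritySortingElement.2.2.1) (pvWitness_PessimisticmajoritySortingElement.2.2.2) := by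
  constructor <;> decide

-- mapping over the enumeration of a mapped range is mapping over the range
theorem pv_enum_map_range (n : Nat) (f : Nat → Int) (h : Int → Int → Int) :
    (PySem.List.enumerate ((List.range n).map f) 0).map (fun cs => h cs.1 cs.2)
      = (List.range n).map (fun (c : Nat) => h (c : Int) (f c)) := by
  apply List.ext_getElem
  · simp [PySem.List.length_enumerate]
  · intro k h1 h2
    simp [PySem.List.getElem_enumerate]

-- B's accumulation loop, columnwise: starting from a range-map, it folds each column independently
theorem pvB_fold (weights : List Int) (lp : List (List Int)) (l : List (Int × Int)) (n : Nat) (f : Nat → Int) :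
    l.foldl (fun scores iv =>
        (PySem.List.enumerate scores 0).map (fun cs =>
          cs.2 + (if iv.2 > pvG lp iv.1 cs.1
                  then (PySem.List.pyGet? weights iv.1).getD 0 else 0)))
      ((List.range n).map f)
    = (List.range n).map (fun (c : Nat) =>
        l.foldl (fun r iv =>
          r + (if iv.2 > pvG lp iv.1 (c : Int)
               then (PySem.List.pyGet? weights iv.1).getD 0 else 0)) (f c)) := by
  induction l generalizing f with
  | nil => rfl
  | cons iv l ih =>
    simp only [List.foldl_cons]
    rw [pv_enum_map_range n f (fun c s => s + (if iv.2 > pvG lp iv.1 c then (PySem.List.pyGet? weights iv.1).getD 0 else 0))]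
    exact ih (fun (c : Nat) => f c + (if iv.2 > pvG lp iv.1 (c : Int) then (PySem.List.pyGet? weights iv.1).getD 0 else 0))

-- A's main loop: the second component counts threshold hits starting from k, ignoring the score list
theorem pvA_fold (θ : Int) (score : List Int → Int) (l : List (List Int)) (acc : List Int) (k : Int) :
    (l.foldl (fun (st : List Int × Int) p =>
        (st.1 ++ [score p], if score p ≥ θ then st.2 + 1 else st.2)) (acc, k)).2
    = l.foldl (fun r p => if score p ≥ θ then r + 1 else r) k := by
  induction l generalizing acc k with
  | nil => rfl
  | cons p l ih => simp only [List.foldl_cons]; exact ih _ _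

-- under Pre_ (with at least one column), A's score of column c equals B's columnwise fold
theorem pv_score_col (a : List Int) (weights : List Int) (lp : List (List Int)) (c : Nat)
    (hlen : a.length ≤ lp.length) :
    pvComputeScore a weights ((List.range lp.length).map (fun (j : Nat) => pvG lp (j : Int) (c : Int)))
    = (PySem.List.enumerate a 0).foldl (fun r iv =>
        r + (if iv.2 > pvG lp iv.1 (c : Int)
             then (PySem.List.pyGet? weights iv.1).getD 0 else 0)) 0 := by
  unfold pvComputeScore
  apply PySem.List.foldl_congr_mem
  intro acc iv hm
  rcases (PySem.List.mem_enumerate_iff _ _ _).1 hm with ⟨k, hk, rfl⟩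
  have hkl : k < lp.length := lt_of_lt_of_le hk hlen
  simp only [zero_add]
  have hget : PySem.List.pyGet? ((List.range lp.length).map (fun (j : Nat) => pvG lp (j : Int) (c : Int))) ((k : Nat) : Int) = some (pvG lp (k : Int) (c : Int)) := by
    rw [PySem.List.pyGet?_natCast]
    simp [hkl]
  simp only [hget, Option.getD_some]
  split_ifs <;> omega

theorem pv_main (a : List Int) (weights : List Int) (lp : List (List Int)) (θ : Int)
    (hpre : Pre_PessimisticmajoritySortingElement a weights lp θ) :
    PessimisticmajoritySortingElement a weights lp θ
    = PessimisticmajoritySortingElement_alt a weights lp θ := by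
  obtain ⟨-, -, hcase⟩ := hpre
  have hprof : pvLoadProfiles lp
      = (List.range (lp.headD []).length).map (fun (c : Nat) => (List.range lp.length).map (fun (j : Nat) => pvG lp (j : Int) (c : Int))) := rfl
  -- A as a count over columns
  have hA : PessimisticmajoritySortingElement a weights lp θ
      = -1 + ((List.range (lp.headD []).length).countP
          (fun (c : Nat) => decide (pvComputeScore a weights ((List.range lp.length).map (fun (j : Nat) => pvG lp (j : Int) (c : Int))) ≥ θ)) : Int) := by
    unfold PessimisticmajoritySortingElement
    rw [hprof, pvA_fold θ (pvComputeScore a weights), List.foldl_map,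
      PySem.List.foldl_ite_add_one]
  -- B as a count over columns
  have hB : PessimisticmajoritySortingElement_alt a weights lp θ
      = 0 + ((List.range (lp.headD []).length).countP
          (fun (c : Nat) => decide ((PySem.List.enumerate a 0).foldl (fun r iv => r + (if iv.2 > pvG lp iv.1 (c : Int) then (PySem.List.pyGet? weights iv.1).getD 0 else 0)) 0 ≥ θ)) : Int) - 1 := by
    show ((PySem.List.enumerate a 0).foldl
        (fun scores iv =>
          (PySem.List.enumerate scores 0).map (fun cs =>
            cs.2 + (if iv.2 > pvG lp iv.1 cs.1
                    then (PySem.List.pyGet? weights iv.1).getD 0 else 0)))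
        (List.replicate (lp.headD []).length (0 : Int))).foldl
        (fun acc s => if s ≥ θ then acc + 1 else acc) 0 - 1 = _
    have hrepl : List.replicate (lp.headD []).length (0 : Int)
        = (List.range (lp.headD []).length).map (fun _ => (0 : Int)) := by
      simp [List.map_const']
    rw [hrepl, pvB_fold weights lp _ _ (fun _ => (0 : Int)), List.foldl_map,
      PySem.List.foldl_ite_add_one]
  rw [hA, hB]
  -- the two per-column predicates agree under Pre_
  have hcount := List.countP_congr (l := List.range (lp.headD []).length)
    (p := fun (c : Nat) => decide (pvComputeScore a weights ((List.range lp.length).map (fun (j : Nat) => pvG lp (j : Int) (c : Int))) ≥ θ))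
    (q := fun (c : Nat) => decide ((PySem.List.enumerate a 0).foldl (fun r iv => r + (if iv.2 > pvG lp iv.1 (c : Int) then (PySem.List.pyGet? weights iv.1).getD 0 else 0)) 0 ≥ θ))
    (by
      intro c hmem
      have hc : c < (lp.headD []).length := List.mem_range.1 hmem
      have hlen : a.length ≤ lp.length := by
        rcases hcase with h0 | ⟨h1, -⟩
        · omega
        · exact h1
      simp only [pv_score_col a weights lp c hlen])
  rw [hcount]
  omega

-- ===== VERDICT (by name: the statement is the Claim_ definition above) =====
theorem PessimisticmajoritySortingElement_spec : Claim_equal_PessimisticmajoritySortingElement := by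
  intro a weights lp θ _ hpre
  unfold Spec_PessimisticmajoritySortingElement
  exact pv_main a weights lp θ hpre
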